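-- pv_equiv track=rewrite | github.com/iamKimanAdhikari/Google_PageRank_Algorithm | Scripts/animate_pagerank.py | _get_node_level
-- ===== SOURCE A (Python) =====
-- def _get_node_level(node_index, num_nodes):
--     """Determine which hierarchical level a node belongs to"""
--     level_structure = [(1, 1), (1, 3), (2, 6), (3, 8), (4, 10)]
--     cumulative_nodes = 0
--
--     for level, (rows, cols) in enumerate(level_structure):
--         max_nodes_in_level = rows * cols
--         nodes_in_this_level = min(max_nodes_in_level, num_nodes - cumulative_nodes)
--         if node_index < cumulative_nodes + nodes_in_this_level:
--             return level
--         cumulative_nodes += nodes_in_this_level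
--
--     return len(level_structure)
-- ===== SOURCE B (Python) =====
-- def _get_node_level(node_index, num_nodes):
--     """Determine which hierarchical level a node belongs to"""
--     # A's running cumulative count after k levels always equals
--     # min(prefix_k, num_nodes) with prefix sums [1, 4, 16, 40, 80], so the
--     # level is 5 when node_index >= num_nodes and otherwise the number of
--     # prefix thresholds <= node_index, found here by binary search.
--     if node_index >= num_nodes:
--         return 5
--     thresholds = [1, 4, 16, 40, 80]
--     lo, hi = 0, 5
--     while lo < hi:
--         mid = (lo + hi) // 2
--         if node_index < thresholds[mid]:
--             hi = mid
--         else: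
--             lo = mid + 1
--     return lo
-- ===== Notes on version B (the rewrite author's own statement) =====
-- stated objective: alternative
-- what changed: Replaces A's linear scan with a running cumulative accumulator by an early num_nodes guard plus a binary search over the precomputed prefix-sum thresholds [1,4,16,40,80]; exact because A's accumulator after k levels equals min(prefix_k, num_nodes).
import Mathlib
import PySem

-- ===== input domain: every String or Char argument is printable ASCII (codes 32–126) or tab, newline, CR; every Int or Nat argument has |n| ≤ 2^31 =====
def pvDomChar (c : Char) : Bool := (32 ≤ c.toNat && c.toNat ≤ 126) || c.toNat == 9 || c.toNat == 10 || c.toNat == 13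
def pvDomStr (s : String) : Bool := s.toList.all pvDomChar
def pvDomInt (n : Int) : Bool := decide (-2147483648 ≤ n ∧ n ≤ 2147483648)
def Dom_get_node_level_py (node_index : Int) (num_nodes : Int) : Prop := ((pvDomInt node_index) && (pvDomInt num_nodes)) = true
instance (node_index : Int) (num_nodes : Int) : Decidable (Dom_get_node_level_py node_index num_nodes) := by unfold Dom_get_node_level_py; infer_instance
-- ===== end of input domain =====

-- B replaces A's linear scan with a running accumulator by an early guard plus a
-- binary search over the precomputed prefix-sum thresholds (objective: alternative).

-- ===== PORT A =====
-- literal port of A's loop over level_structure with a running accumulator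
def get_node_level_py_loop (pairs : List (Int × Int)) (level : Int)
    (cumulative_nodes : Int) (node_index : Int) (num_nodes : Int) : Int :=
  match pairs with
  | [] => 5  -- len(level_structure)
  | (rows, cols) :: rest =>
    let max_nodes_in_level := rows * cols
    let nodes_in_this_level := min max_nodes_in_level (num_nodes - cumulative_nodes)
    if node_index < cumulative_nodes + nodes_in_this_level then level
    else get_node_level_py_loop rest (level + 1) (cumulative_nodes + nodes_in_this_level) node_index num_nodes

def get_node_level_py (node_index : Int) (num_nodes : Int) : Int :=
  get_node_level_py_loop [(1, 1), (1, 3), (2, 6), (3, 8), (4, 10)] 0 0 node_index num_nodes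

-- ===== PORT B =====
-- port of B's binary-search while loop; fuel-based transcription of the while:
-- fuel 5 ≥ hi - lo always suffices since the gap halves each pass, so the
-- fuel-out branch is never reached; thresholds[mid] is always in range
-- (0 ≤ lo ≤ mid < hi ≤ 5 throughout), so getD is exact here
def get_node_level_py_alt_bs (fuel : Nat) (thresholds : List Int) (node_index : Int) (lo hi : Nat) : Nat :=
  match fuel with
  | 0 => lo
  | fuel + 1 =>
    if lo < hi then
      let mid := (lo + hi) / 2
      if node_index < thresholds.getD mid 0 then
        get_node_level_py_alt_bs fuel thresholds node_index lo mid
      else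
        get_node_level_py_alt_bs fuel thresholds node_index (mid + 1) hi
    else lo

def get_node_level_py_alt (node_index : Int) (num_nodes : Int) : Int :=
  if node_index ≥ num_nodes then 5
  else (get_node_level_py_alt_bs 5 [1, 4, 16, 40, 80] node_index 0 5 : Int)

-- ===== PRECONDITION & SPEC =====
def Spec_get_node_level_py (node_index : Int) (num_nodes : Int) (out : Int) : Prop := out = get_node_level_py_alt node_index num_nodes
instance (node_index : Int) (num_nodes : Int) (out : Int) : Decidable (Spec_get_node_level_py node_index num_nodes out) := by unfold Spec_get_node_level_py; infer_instance

-- ===== CLAIM (what is proved, stated in full; the proofs are below) =====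
def Claim_equal_get_node_level_py : Prop := ∀ (node_index : Int) (num_nodes : Int), Dom_get_node_level_py node_index num_nodes → Spec_get_node_level_py node_index num_nodes (get_node_level_py node_index num_nodes)

-- ===== LEMMAS AND PROOFS =====

-- ===== VERDICT (by name: the statement is the Claim_ definition above) =====
theorem get_node_level_py_spec : Claim_equal_get_node_level_py := by
  intro ni nn _
  unfold Spec_get_node_level_py get_node_level_py get_node_level_py_alt
  simp only [get_node_level_py_loop, get_node_level_py_alt_bs, List.getD]
  norm_num
  split_ifs <;> omega
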